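-- pv_equiv track=rewrite | github.com/MatthewBlyth/OAI-TTS-Scripts | Latex to python chunks.py | reflow_text
-- ===== SOURCE A (Python) =====
-- def reflow_text(text):
--     """
--     Reflows text by joining lines that belong to the same paragraph.
--     Lines separated by a blank line are considered separate paragraphs.
--     """
--     paragraphs = []
--     current_paragraph = []
--     for line in text.splitlines():
--         if line.strip():
--             current_paragraph.append(line.strip())
--         else:
--             if current_paragraph:
--                 paragraphs.append(" ".join(current_paragraph))
--                 current_paragraph = []
--     if current_paragraph:
--         paragraphs.append(" ".join(current_paragraph))
--     return "\n\n".join(paragraphs)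
-- ===== SOURCE B (Python) =====
-- def reflow_text(text):
--     """
--     Reflows text by joining lines that belong to the same paragraph.
--     Lines separated by a blank line are considered separate paragraphs.
--     """
--     lines = [l.strip() for l in text.splitlines()]
--     paragraphs = []
--     i, n = 0, len(lines)
--     while i < n:
--         if not lines[i]:
--             i += 1
--             continue
--         j = i
--         while j < n and lines[j]:
--             j += 1
--         paragraphs.append(" ".join(lines[i:j]))
--         i = j
--     return "\n\n".join(paragraphs)
-- ===== Notes on version B (the rewrite author's own statement) =====
-- stated objective: alternative
-- what changed: Replaces A's accumulator-and-flush fold with a strip-all-lines pass followed by two-pointer span grouping: each paragraph is taken as a whole contiguous run of non-blank lines and joined at once, with no pending-paragraph state and no post-loop flush.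
import Mathlib
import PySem

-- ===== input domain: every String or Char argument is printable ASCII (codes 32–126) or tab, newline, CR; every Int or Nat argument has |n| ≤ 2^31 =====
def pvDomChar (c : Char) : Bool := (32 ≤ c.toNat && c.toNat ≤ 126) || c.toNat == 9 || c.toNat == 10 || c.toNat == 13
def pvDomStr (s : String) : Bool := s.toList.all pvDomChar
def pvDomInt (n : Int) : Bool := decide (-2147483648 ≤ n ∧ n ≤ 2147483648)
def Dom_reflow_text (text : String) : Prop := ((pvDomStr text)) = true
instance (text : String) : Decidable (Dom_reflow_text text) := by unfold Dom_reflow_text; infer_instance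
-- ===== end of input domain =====

-- B replaces A's accumulator-and-flush fold by stripping all lines first and
-- grouping contiguous runs of non-blank lines (two-pointer spans); alternative decomposition, same cost.


-- ===== PORT A =====
def reflow_text (text : String) : String :=
  let st := (PySem.Str.splitlines text).foldl
    (fun (st : List String × List String) line =>
      if PySem.Str.strip line ≠ "" then
        (st.1, st.2 ++ [PySem.Str.strip line])
      else if st.2 ≠ [] then
        (st.1 ++ [PySem.Str.join " " st.2], [])
      else st)
    ([], [])
  let paragraphs := if st.2 ≠ [] then st.1 ++ [PySem.Str.join " " st.2] else st.1
  PySem.Str.join "\n\n" paragraphs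

-- ===== PORT B =====
-- the two-pointer span in Source B: the inner `while j < n and lines[j]` scan + slice
-- lines[i:j] is takeWhile of non-blank from position i, and `i = j` is dropWhile
def reflowGroups : List String → List String
  | [] => []
  | l :: rest =>
    if l = "" then reflowGroups rest
    else PySem.Str.join " " (l :: rest.takeWhile (· ≠ "")) ::
         reflowGroups (rest.dropWhile (· ≠ ""))
termination_by ls => ls.length
decreasing_by
  · simp
  · simpa using Nat.lt_succ_of_le (List.length_dropWhile_le (p := (· ≠ "")) (l := rest))

def reflow_text_alt (text : String) : String :=
  PySem.Str.join "\n\n" (reflowGroups ((PySem.Str.splitlines text).map PySem.Str.strip))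

-- ===== PRECONDITION & SPEC =====
def Spec_reflow_text (text : String) (out : String) : Prop := out = reflow_text_alt text
instance (text : String) (out : String) : Decidable (Spec_reflow_text text out) := by unfold Spec_reflow_text; infer_instance

-- ===== CLAIM (what is proved, stated in full; the proofs are below) =====
def Claim_equal_reflow_text : Prop := ∀ (text : String), Dom_reflow_text text → Spec_reflow_text text (reflow_text text)

-- ===== LEMMAS AND PROOFS =====
-- A's loop body, on an already-stripped line
def stepF (st : List String × List String) (line : String) : List String × List String :=
  if line ≠ "" then (st.1, st.2 ++ [line])
  else if st.2 ≠ [] then (st.1 ++ [PySem.Str.join " " st.2], [])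
  else st

def flushF (st : List String × List String) : List String :=
  if st.2 ≠ [] then st.1 ++ [PySem.Str.join " " st.2] else st.1

-- A's grouping with an explicit pending paragraph
def gAux (cur : List String) : List String → List String
  | [] => if cur ≠ [] then [PySem.Str.join " " cur] else []
  | l :: rest =>
    if l ≠ "" then gAux (cur ++ [l]) rest
    else if cur ≠ [] then PySem.Str.join " " cur :: gAux [] rest
    else gAux [] rest

theorem foldFlush (ls : List String) : ∀ ps cur,
    flushF (ls.foldl stepF (ps, cur)) = ps ++ gAux cur ls := by
  induction ls with
  | nil => intro ps cur; simp [flushF, gAux]; split_ifs <;> simp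
  | cons l rest ih =>
    intro ps cur
    by_cases hl : l = ""
    · by_cases hc : cur = []
      · simp [stepF, gAux, hl, hc, ih]
      · simp [stepF, gAux, hl, hc, ih]
    · simp [stepF, gAux, hl, ih]

theorem gAux_spec (ls : List String) :
    gAux [] ls = reflowGroups ls ∧
    ∀ cur, cur ≠ [] →
      gAux cur ls = PySem.Str.join " " (cur ++ ls.takeWhile (· ≠ "")) ::
        reflowGroups (ls.dropWhile (· ≠ "")) := by
  induction ls with
  | nil =>
    refine ⟨by simp [gAux, reflowGroups], ?_⟩
    intro cur hc; simp [gAux, reflowGroups, hc]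
  | cons l rest ih =>
    by_cases hl : l = ""
    · refine ⟨?_, ?_⟩
      · simp [gAux, reflowGroups, hl, ih.1]
      · intro cur hc
        simp [gAux, reflowGroups, hl, hc, ih.1]
    · refine ⟨?_, ?_⟩
      · have h1 : gAux [] (l :: rest) = gAux [l] rest := by simp [gAux, hl]
        rw [h1, ih.2 [l] (by simp), reflowGroups]
        simp [hl]
      · intro cur hc
        rw [show gAux cur (l :: rest) = gAux (cur ++ [l]) rest by simp [gAux, hl]]
        rw [ih.2 (cur ++ [l]) (by simp)]
        simp [hl]

-- ===== VERDICT (by name: the statement is the Claim_ definition above) =====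
theorem reflow_text_spec : Claim_equal_reflow_text := by
  intro text _
  show PySem.Str.join "\n\n"
      (flushF ((PySem.Str.splitlines text).foldl
        (fun st line => stepF st (PySem.Str.strip line)) ([], []))) =
    PySem.Str.join "\n\n" (reflowGroups ((PySem.Str.splitlines text).map PySem.Str.strip))
  rw [← List.foldl_map, foldFlush]
  simp [(gAux_spec _).1]
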